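-- pv_equiv track=rewrite | github.com/NeLLi-team/sgtree | sgtree/ani.py | _position_is_covered
-- ===== SOURCE A (Python) =====
-- def _position_is_covered(intervals: list[tuple[int, int]], pos: int) -> bool:
--     lo = 0
--     hi = len(intervals) - 1
--     while lo <= hi:
--         mid = (lo + hi) // 2
--         start, end = intervals[mid]
--         if start <= pos < end:
--             return True
--         if pos < start:
--             hi = mid - 1
--         else:
--             lo = mid + 1
--     return False
-- ===== SOURCE B (Python) =====
-- def _position_is_covered(intervals: list[tuple[int, int]], pos: int) -> bool:
--     def search(seq: list[tuple[int, int]]) -> bool: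
--         if not seq:
--             return False
--         m = (len(seq) - 1) // 2
--         start, end = seq[m]
--         if start <= pos < end:
--             return True
--         if pos < start:
--             return search(seq[:m])
--         return search(seq[m + 1:])
--     return search(intervals)
-- ===== Notes on version B (the rewrite author's own statement) =====
-- stated objective: alternative
-- what changed: A's iterative binary search over (lo, hi) index bounds is replaced by a recursive helper that searches list slices (seq[:m] / seq[m+1:]) with the same midpoint arithmetic, so behaviour is identical even on unsorted or overlapping intervals.
import Mathlib
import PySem

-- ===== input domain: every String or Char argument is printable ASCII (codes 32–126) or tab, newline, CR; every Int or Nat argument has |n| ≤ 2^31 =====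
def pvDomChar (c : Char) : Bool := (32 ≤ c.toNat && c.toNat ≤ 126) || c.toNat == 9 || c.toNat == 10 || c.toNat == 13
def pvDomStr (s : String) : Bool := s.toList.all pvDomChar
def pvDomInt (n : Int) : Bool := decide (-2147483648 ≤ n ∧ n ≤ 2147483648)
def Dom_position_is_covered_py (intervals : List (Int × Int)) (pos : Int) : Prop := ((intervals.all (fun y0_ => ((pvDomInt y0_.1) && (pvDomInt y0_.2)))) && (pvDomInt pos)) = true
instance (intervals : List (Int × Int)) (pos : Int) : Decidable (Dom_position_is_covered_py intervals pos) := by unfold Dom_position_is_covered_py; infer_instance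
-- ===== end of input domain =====

-- B re-implements A's iterative binary search as a recursion on list slices (same midpoint arithmetic, so identical behaviour even on unsorted input); objective: alternative decomposition, same cost.

-- ===== PORT A =====
-- A's while loop over the index bounds (lo, hi); the 'none' branch only makes the
-- indexing total (mid is always in range when the loop runs).
def pvALoop (intervals : List (Int × Int)) (pos lo hi : Int) : Bool :=
  if h : lo ≤ hi then
    let mid := PySem.Int.floordiv (lo + hi) 2
    match PySem.List.pyGet? intervals mid with
    | none => false
    | some (s, e) =>
      if s ≤ pos ∧ pos < e then true
      else if pos < s then pvALoop intervals pos lo (mid - 1)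
      else pvALoop intervals pos (mid + 1) hi
  else false
termination_by (hi + 1 - lo).toNat
decreasing_by
  all_goals
    have hb := PySem.Int.floordiv_two_mid_bounds h
    omega

def position_is_covered_py (intervals : List (Int × Int)) (pos : Int) : Bool :=
  pvALoop intervals pos 0 ((intervals.length : Int) - 1)

-- ===== PORT B =====
-- B's recursive helper 'search' on the sub-list itself.
def pvBSearch (pos : Int) (seq : List (Int × Int)) : Bool :=
  if hseq : seq.isEmpty then false
  else
    let m := PySem.Int.floordiv ((seq.length : Int) - 1) 2
    match PySem.List.pyGet? seq m with
    | none => false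
    | some (s, e) =>
      if s ≤ pos ∧ pos < e then true
      else if pos < s then pvBSearch pos (PySem.List.slice seq none (some m))
      else pvBSearch pos (PySem.List.slice seq (some (m + 1)) none)
termination_by seq.length
decreasing_by
  all_goals
    have hlen : 1 ≤ seq.length := by
      cases seq with
      | nil => simp at hseq
      | cons a l => simp
    rw [PySem.Int.floordiv_eq_ediv_of_pos (by omega)]
    first
      | rw [PySem.List.slice_to _ (by omega)]
      | rw [PySem.List.slice_from _ (by omega)]
    simp
    omega

def position_is_covered_py_alt (intervals : List (Int × Int)) (pos : Int) : Bool :=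
  pvBSearch pos intervals

-- ===== PRECONDITION & SPEC =====
def Spec_position_is_covered_py (intervals : List (Int × Int)) (pos : Int) (out : Bool) : Prop := out = position_is_covered_py_alt intervals pos
instance (intervals : List (Int × Int)) (pos : Int) (out : Bool) : Decidable (Spec_position_is_covered_py intervals pos out) := by unfold Spec_position_is_covered_py; infer_instance

-- ===== CLAIM (what is proved, stated in full; the proofs are below) =====
def Claim_equal_position_is_covered_py : Prop := ∀ (intervals : List (Int × Int)) (pos : Int), Dom_position_is_covered_py intervals pos → Spec_position_is_covered_py intervals pos (position_is_covered_py intervals pos)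

-- ===== LEMMAS AND PROOFS =====

-- The loop of A searching indices [lo, hi] equals B's recursion on the slice intervals[lo : hi+1].
lemma pv_loop_eq_search (n : Nat) (intervals : List (Int × Int)) (pos : Int) :
    ∀ (lo hi : Int), 0 ≤ lo → hi < (intervals.length : Int) → (hi + 1 - lo).toNat ≤ n →
      pvALoop intervals pos lo hi =
        pvBSearch pos ((intervals.drop lo.toNat).take (hi + 1 - lo).toNat) := by
  induction n with
  | zero =>
    intro lo hi hlo hhi hn
    have hgt : hi < lo := by omega
    rw [pvALoop, pvBSearch]
    simp [not_le.mpr hgt, show (hi + 1 - lo).toNat = 0 by omega]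
  | succ n ih =>
    intro lo hi hlo hhi hn
    by_cases hle : lo ≤ hi
    · -- set up the sub-list
      set K : Nat := (hi + 1 - lo).toNat with hK
      have hKlen : ((intervals.drop lo.toNat).take K).length = K := by
        simp [hK]; omega
      have hKpos : 1 ≤ K := by omega
      have hmidb := PySem.Int.floordiv_two_mid_bounds  hle
      have hmid : PySem.Int.floordiv (lo + hi) 2 = (lo + hi) / 2 :=
        PySem.Int.floordiv_eq_ediv_of_pos (by omega)
      have hm : PySem.Int.floordiv ((((intervals.drop lo.toNat).take K).length : Int) - 1) 2
          = (lo + hi) / 2 - lo := by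
        rw [hKlen, PySem.Int.floordiv_eq_ediv_of_pos (by omega)]
        omega
      set mid : Int := (lo + hi) / 2 with hmiddef
      have hmb : lo ≤ mid ∧ mid ≤ hi := by rw [hmiddef]; rw [hmid] at hmidb; exact hmidb
      -- both sides read the same element
      have hgetA : PySem.List.pyGet? intervals mid = intervals[mid.toNat]? :=
        PySem.List.pyGet?_of_nonneg _ (by omega)
      have hgetB : PySem.List.pyGet? ((intervals.drop lo.toNat).take K) (mid - lo)
          = intervals[mid.toNat]? := by
        rw [PySem.List.pyGet?_of_nonneg _ (by omega)]
        rw [List.getElem?_take_of_lt (by omega), List.getElem?_drop]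
        congr 1; omega
      rw [pvALoop, pvBSearch]
      simp only [dif_pos hle, hmid]
      have hne : ¬ ((intervals.drop lo.toNat).take K).isEmpty := by
        simp [List.isEmpty_iff, ← List.length_eq_zero_iff, hKlen]; omega
      simp only [dif_neg hne, hm, hgetA, hgetB]
      cases hg : intervals[mid.toNat]? with
      | none => simp
      | some p =>
        obtain ⟨s, e⟩ := p
        simp only
        by_cases hin : s ≤ pos ∧ pos < e
        · simp [hin]
        · simp only [if_neg hin]
          by_cases hlt : pos < s
          · simp only [if_pos hlt]
            rw [ih lo (mid - 1) hlo (by omega) (by omega)]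
            congr 1
            rw [PySem.List.slice_to _ (by omega), List.take_take]
            congr 1; omega
          · simp only [if_neg hlt]
            rw [ih (mid + 1) hi (by omega) hhi (by omega)]
            congr 1
            rw [PySem.List.slice_from _ (by omega), List.drop_take, List.drop_drop]
            congr 1
            · omega
            · congr 1
              omega
    · rw [pvALoop, pvBSearch]
      simp [hle, show (hi + 1 - lo).toNat = 0 by omega]

-- ===== VERDICT (by name: the statement is the Claim_ definition above) =====
theorem position_is_covered_py_spec : Claim_equal_position_is_covered_py := by
  intro intervals pos _
  unfold Spec_position_is_covered_py position_is_covered_py position_is_covered_py_alt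
  rw [pv_loop_eq_search intervals.length intervals pos 0 ((intervals.length : Int) - 1)
    (by omega) (by omega) (by omega)]
  congr 1
  simp
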